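-- pv_equiv track=rewrite | github.com/jtsage/python-sord | sord/base/func.py | padright
-- ===== SOURCE A (Python) =====
-- def padright(text, col):
-- 	""" Pad a selection of text to be a specied number of columns wide, right justified.
--
-- 	@param string $text Text to pad
-- 	@param int $col Number of columns to fill """
-- 	col = col - len(text)
-- 	ittr = 0
-- 	retval = ""
-- 	while ( ittr < col ):
-- 		retval += " "
-- 		ittr += 1
-- 	return retval + text
-- ===== SOURCE B (Python) =====
-- def padright(text, col):
--     """Pad text to col columns, right justified (closed form, no loop)."""
--     return " " * (col - len(text)) + text
-- ===== Notes on version B (the rewrite author's own statement) =====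
-- stated objective: simpler
-- what changed: Replaces the per-character while-loop accumulation with a single closed-form string multiplication ' ' * (col - len(text)) prepended to the text.
import Mathlib
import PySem

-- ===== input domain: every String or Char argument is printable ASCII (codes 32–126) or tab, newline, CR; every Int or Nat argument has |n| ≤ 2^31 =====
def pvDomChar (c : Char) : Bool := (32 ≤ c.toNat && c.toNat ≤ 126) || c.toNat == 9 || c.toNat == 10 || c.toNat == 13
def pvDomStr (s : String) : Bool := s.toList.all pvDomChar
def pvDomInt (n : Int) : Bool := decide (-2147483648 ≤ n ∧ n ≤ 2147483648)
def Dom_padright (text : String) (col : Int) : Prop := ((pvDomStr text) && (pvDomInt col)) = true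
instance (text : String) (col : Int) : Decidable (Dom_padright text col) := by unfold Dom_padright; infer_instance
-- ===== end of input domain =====

-- B replaces A's per-character while-loop with the closed form " " * (col - len(text)) + text (simpler).


-- ===== PORT A =====
-- while (ittr < col): retval += " "; ittr += 1   — on List Char
def padrightLoop (ittr col : Int) (retval : List Char) : List Char :=
  if ittr < col then padrightLoop (ittr + 1) col (retval ++ [' ']) else retval
termination_by (col - ittr).toNat
decreasing_by omega

def padright (text : String) (col : Int) : String :=
  let col' := col - (PySem.Str.len text : Int)
  String.mk (padrightLoop 0 col' [] ++ text.toList)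

-- ===== PORT B =====
-- " " * n is the empty string for n ≤ 0, i.e. replicate n.toNat
def padright_alt (text : String) (col : Int) : String :=
  String.mk (List.replicate (col - (PySem.Str.len text : Int)).toNat ' ' ++ text.toList)

-- ===== PRECONDITION & SPEC =====
def Spec_padright (text : String) (col : Int) (out : String) : Prop := out = padright_alt text col
instance (text : String) (col : Int) (out : String) : Decidable (Spec_padright text col out) := by unfold Spec_padright; infer_instance

-- ===== CLAIM (what is proved, stated in full; the proofs are below) =====
def Claim_equal_padright : Prop := ∀ (text : String) (col : Int), Dom_padright text col → Spec_padright text col (padright text col)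

-- ===== LEMMAS AND PROOFS =====
theorem padrightLoop_eq (ittr col : Int) (retval : List Char) :
    padrightLoop ittr col retval = retval ++ List.replicate (col - ittr).toNat ' ' := by
  by_cases h : ittr < col
  · rw [padrightLoop, if_pos h, padrightLoop_eq (ittr + 1) col]
    have : (col - ittr).toNat = (col - (ittr + 1)).toNat + 1 := by omega
    rw [this, List.replicate_succ, List.append_assoc]
    rfl
  · rw [padrightLoop, if_neg h]
    have : (col - ittr).toNat = 0 := by omega
    simp [this]
termination_by (col - ittr).toNat
decreasing_by omega

-- ===== VERDICT (by name: the statement is the Claim_ definition above) =====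
theorem padright_spec : Claim_equal_padright := by
  intro text col _
  show padright text col = padright_alt text col
  unfold padright padright_alt
  simp only [padrightLoop_eq, List.nil_append, Int.sub_zero]
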